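-- pv_equiv track=rewrite | github.com/TheMoerp/crypto_projects | k2/sources/cardinality_element_counter/cardinality_element_counter.py | element_amount
-- ===== SOURCE A (Python) =====
-- def find_prime_factors(j):
--     factors = []
--     for i in range(2, (j // 2)):
--         if(j % i == 0):
--             return [i] + find_prime_factors(j // i)
--     factors.append(j)
--     return factors
--
-- def element_amount(group_num):
--     pos_cardinality = find_prime_factors(group_num-1)
--     pos_cardinality.append(group_num-1)
--     pos_cardinality.insert(0, 1)
--     cardinality_cnt = {}
--     for i in range(1, group_num):
--         for j in pos_cardinality:
--             if (i**j)%group_num == 1: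
--                 try:
--                     if cardinality_cnt[j] >= 1:
--                         cardinality_cnt[j] += 1
--                 except:
--                     cardinality_cnt[j] = 1
--                 break
--     return cardinality_cnt
-- ===== SOURCE B (Python) =====
-- def find_prime_factors(j):
--     factors = []
--     for i in range(2, (j // 2)):
--         if(j % i == 0):
--             return [i] + find_prime_factors(j // i)
--     factors.append(j)
--     return factors
--
-- def element_amount(group_num):
--     pos_cardinality = find_prime_factors(group_num - 1)
--     pos_cardinality.append(group_num - 1)
--     pos_cardinality.insert(0, 1)
--     cardinality_cnt = {}
--     for i in range(1, group_num):
--         # multiplicative order of i mod group_num, if it exists within n-1 steps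
--         order = None
--         cur = i % group_num
--         for d in range(1, group_num):
--             if cur == 1:
--                 order = d
--                 break
--             cur = (cur * i) % group_num
--         if order is None:
--             continue
--         # i**j % n == 1  iff  j % order == 0: take the first such j in list order
--         for j in pos_cardinality:
--             if j % order == 0:
--                 cardinality_cnt[j] = cardinality_cnt.get(j, 0) + 1
--                 break
--     return cardinality_cnt
-- ===== Notes on version B (the rewrite author's own statement) =====
-- stated objective: alternative
-- what changed: Instead of testing each candidate exponent with a full big-integer power modulo n, B computes each element's multiplicative order once by iterated word-sized multiplication mod n and then picks the first candidate exponent that is a multiple of that order.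
import Mathlib
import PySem

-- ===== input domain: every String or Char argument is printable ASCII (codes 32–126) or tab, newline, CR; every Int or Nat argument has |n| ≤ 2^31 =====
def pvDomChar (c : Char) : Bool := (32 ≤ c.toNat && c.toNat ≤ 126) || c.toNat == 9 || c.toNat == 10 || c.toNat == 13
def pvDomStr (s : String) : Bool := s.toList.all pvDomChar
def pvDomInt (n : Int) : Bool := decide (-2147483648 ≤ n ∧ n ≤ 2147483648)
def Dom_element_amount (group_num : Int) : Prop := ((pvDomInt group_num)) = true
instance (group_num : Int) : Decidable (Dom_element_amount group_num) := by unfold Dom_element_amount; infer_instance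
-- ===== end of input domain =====

-- B replaces A's per-exponent big-integer power test by computing each element's
-- multiplicative order with word-sized modular multiplication and testing whether the
-- candidate exponent is a multiple of that order (same per-element loop count; no claim
-- of measured speed).


-- ===== PORT A =====
-- helper shared verbatim by Source A and Source B: the first i in range(2, j//2) with j % i == 0
def fpfDiv (j : Int) : Option Int :=
  List.find? (fun i => PySem.Int.mod j i == 0) (PySem.List.pyRange 2 (PySem.Int.floordiv j 2) 1)

-- termination of find_prime_factors: the recursive call strictly shrinks j
theorem fpfDiv_lt {j i : Int} (h : fpfDiv j = some i) :
    (PySem.Int.floordiv j i).toNat < j.toNat := by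
  have hmem := List.mem_of_find?_eq_some h
  rw [PySem.List.mem_pyRange_one] at hmem
  obtain ⟨h2, hlt⟩ := hmem
  have hj2 : PySem.Int.floordiv j 2 = j / 2 := PySem.Int.floordiv_eq_ediv_of_pos (by omega)
  have hj6 : 6 ≤ j := by rw [hj2] at hlt; omega
  have hlt' : PySem.Int.floordiv j i < j :=
    (PySem.Int.floordiv_lt_iff_lt_mul (by omega)).2 (by nlinarith)
  have hge : 0 ≤ PySem.Int.floordiv j i :=
    (PySem.Int.le_floordiv_iff_mul_le (by omega) (q := 0)).2 (by omega)
  omega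

def find_prime_factors (j : Int) : List Int :=
  match h : fpfDiv j with
  | some i => i :: find_prime_factors (PySem.Int.floordiv j i)
  | none => [j]
termination_by j.toNat
decreasing_by exact fpfDiv_lt h

-- pos_cardinality after .append(group_num-1) and .insert(0, 1)  (shared verbatim by both programs)
def posList (group_num : Int) : List Int :=
  1 :: (find_prime_factors (group_num - 1) ++ [group_num - 1])

-- body of A's i-loop; (i**j) is ported as i ^ j.toNat, exact because whenever the i-loop
-- runs at all, every entry of pos_cardinality is a positive exponent
def stepA (group_num : Int) (cnt : PySem.Dict Int Int) (i : Int) : PySem.Dict Int Int :=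
  match List.find? (fun j => PySem.Int.mod (i ^ j.toNat) group_num == 1) (posList group_num) with
  | some j =>
      match cnt.get? j with
      | some v => if v ≥ 1 then cnt.insert j (v + 1) else cnt
      | none => cnt.insert j 1
  | none => cnt

def element_amount (group_num : Int) : List (Int × Int) :=
  ((PySem.List.pyRange 1 group_num 1).foldl (stepA group_num) PySem.Dict.empty).items

-- ===== PORT B =====
-- B's inner order loop: the first d in the remaining range with cur == 1, cur updated mod n
def findOrderGo (i n : Int) : List Int → Int → Option Int
  | [], _ => none
  | d :: ds, cur => if cur == 1 then some d else findOrderGo i n ds (PySem.Int.mod (cur * i) n)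

-- body of B's i-loop: order first, then the first j the order divides
def stepB (group_num : Int) (cnt : PySem.Dict Int Int) (i : Int) : PySem.Dict Int Int :=
  match findOrderGo i group_num (PySem.List.pyRange 1 group_num 1) (PySem.Int.mod i group_num) with
  | none => cnt
  | some ord =>
      match List.find? (fun j => PySem.Int.mod j ord == 0) (posList group_num) with
      | some j => cnt.insert j (cnt.getD j 0 + 1)
      | none => cnt

def element_amount_alt (group_num : Int) : List (Int × Int) :=
  ((PySem.List.pyRange 1 group_num 1).foldl (stepB group_num) PySem.Dict.empty).items

-- ===== PRECONDITION & SPEC =====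
def Spec_element_amount (group_num : Int) (out : List (Int × Int)) : Prop := out = element_amount_alt group_num
instance (group_num : Int) (out : List (Int × Int)) : Decidable (Spec_element_amount group_num out) := by unfold Spec_element_amount; infer_instance

-- ===== CLAIM (what is proved, stated in full; the proofs are below) =====
def Claim_equal_element_amount : Prop := ∀ (group_num : Int), Dom_element_amount group_num → Spec_element_amount group_num (element_amount group_num)

-- ===== LEMMAS AND PROOFS =====

theorem fpfDiv_facts {j i : Int} (h : fpfDiv j = some i) :
    2 ≤ i ∧ i < PySem.Int.floordiv j 2 ∧ PySem.Int.mod j i = 0 := by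
  have hmem := List.mem_of_find?_eq_some h
  rw [PySem.List.mem_pyRange_one] at hmem
  have hp := List.find?_some h
  simp at hp
  exact ⟨hmem.1, hmem.2, hp⟩

-- every entry of find_prime_factors j lies in [1, j] (for j ≥ 1)
theorem fpf_bounds : ∀ (j : Int), 1 ≤ j → ∀ x ∈ find_prime_factors j, 1 ≤ x ∧ x ≤ j := by
  intro j
  induction j using find_prime_factors.induct with
  | case1 j i h ih =>
    intro hj x hx
    obtain ⟨h2, hlt, hdvd⟩ := fpfDiv_facts h
    have hj2 : PySem.Int.floordiv j 2 = j / 2 := PySem.Int.floordiv_eq_ediv_of_pos (by omega)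
    have hj6 : 6 ≤ j := by rw [hj2] at hlt; omega
    have hij : i ≤ j := by rw [hj2] at hlt; omega
    have hq1 : 1 ≤ PySem.Int.floordiv j i :=
      (PySem.Int.le_floordiv_iff_mul_le (by omega) (q := 1)).2 (by omega)
    have hqj : PySem.Int.floordiv j i < j :=
      (PySem.Int.floordiv_lt_iff_lt_mul (by omega)).2 (by nlinarith)
    rw [find_prime_factors, h] at hx
    rcases List.mem_cons.1 hx with rfl | hx
    · constructor <;> omega
    · have := ih hq1 x hx
      constructor <;> omega
  | case2 j h =>
    intro hj x hx
    rw [find_prime_factors, h] at hx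
    simp at hx
    subst hx
    exact ⟨hj, le_refl _⟩

theorem posList_bounds (n : Int) (hn : 2 ≤ n) :
    ∀ x ∈ posList n, 1 ≤ x ∧ x ≤ n - 1 := by
  intro x hx
  rcases List.mem_cons.1 hx with rfl | hx
  · exact ⟨le_refl 1, by omega⟩
  rcases List.mem_append.1 hx with hx | hx
  · have := fpf_bounds (n - 1) (by omega) x hx
    exact ⟨this.1, this.2⟩
  · simp at hx
    subst hx
    exact ⟨by omega, le_refl _⟩

-- a % n == 1 over Int (n ≥ 2) expressed in ZMod n.toNat
theorem mod_eq_one_iff_zmod (n a : Int) (hn : 2 ≤ n) :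
    (PySem.Int.mod a n = 1) ↔ ((a : ZMod n.toNat) = 1) := by
  rw [PySem.Int.mod_eq_emod_of_pos (show (0:Int) < n by omega)]
  have hcast : ((n.toNat : Int)) = n := Int.toNat_of_nonneg (by omega)
  have h1 : (a : ZMod n.toNat) = 1 ↔ a ≡ 1 [ZMOD (n.toNat : Int)] := by
    rw [← ZMod.intCast_eq_intCast_iff]
    push_cast
    rfl
  have h2 : (1:Int) % n = 1 := Int.emod_eq_of_lt (by omega) (by omega)
  rw [h1, hcast, Int.ModEq, h2]

-- characterisation of B's order loop
theorem findOrderGo_spec (i n : Int) (hn : 2 ≤ n) :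
    ∀ (a : Int), 1 ≤ a →
      (∀ ord, (findOrderGo i n (PySem.List.pyRange a n 1) (PySem.Int.mod (i ^ a.toNat) n) = some ord ↔
        (a ≤ ord ∧ ord < n ∧ PySem.Int.mod (i ^ ord.toNat) n = 1 ∧
          ∀ d, a ≤ d → d < ord → PySem.Int.mod (i ^ d.toNat) n ≠ 1))) ∧
      (findOrderGo i n (PySem.List.pyRange a n 1) (PySem.Int.mod (i ^ a.toNat) n) = none ↔
        ∀ d, a ≤ d → d < n → PySem.Int.mod (i ^ d.toNat) n ≠ 1) := by
  intro a
  induction hk : (n - a).toNat using Nat.strong_induction_on generalizing a with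
  | _ k ih =>
    intro ha
    by_cases hlt : a < n
    · have hcons := PySem.List.pyRange_one_cons hlt
      have hstep : PySem.Int.mod (PySem.Int.mod (i ^ a.toNat) n * i) n
          = PySem.Int.mod (i ^ (a + 1).toNat) n := by
        rw [PySem.Int.mod_eq_emod_of_pos (show (0:Int) < n by omega),
            PySem.Int.mod_eq_emod_of_pos (show (0:Int) < n by omega),
            PySem.Int.mod_eq_emod_of_pos (show (0:Int) < n by omega)]
        have : (a + 1).toNat = a.toNat + 1 := by omega
        rw [this, pow_succ, Int.mul_emod (i ^ a.toNat % n) i n,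
            Int.mul_emod (i ^ a.toNat) i n, Int.emod_emod_of_dvd _ (dvd_refl n)]
      rw [hcons]
      by_cases hone : PySem.Int.mod (i ^ a.toNat) n = 1
      · constructor
        · intro ord
          simp only [findOrderGo, hone, BEq.rfl, if_true]
          constructor
          · rintro h; injection h with h; subst h
            exact ⟨le_refl a, hlt, hone, fun d hd1 hd2 => by omega⟩
          · rintro ⟨h1, h2, h3, h4⟩
            by_cases hcase : a = ord
            · rw [hcase]
            · exact absurd hone (h4 a (le_refl a) (by omega))
        · simp only [findOrderGo, hone, BEq.rfl, if_true]
          constructor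
          · intro h; exact absurd h (by simp)
          · intro h; exact absurd hone (h a (le_refl a) hlt)
      · have hbeq : ((PySem.Int.mod (i ^ a.toNat) n == 1) = false) := by
          simp [hone]
        have ihx := ih (n - (a+1)).toNat (by omega) (a+1) rfl (by omega)
        constructor
        · intro ord
          simp only [findOrderGo, hbeq, Bool.false_eq_true, if_false, hstep]
          rw [(ihx.1 ord)]
          constructor
          · rintro ⟨h1, h2, h3, h4⟩
            exact ⟨by omega, h2, h3, fun d hd1 hd2 => by
              by_cases hda : d = a
              · subst hda; exact hone
              · exact h4 d (by omega) hd2⟩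
          · rintro ⟨h1, h2, h3, h4⟩
            have hord : a ≠ ord := fun hc => by subst hc; exact hone h3
            exact ⟨by omega, h2, h3, fun d hd1 hd2 => h4 d (by omega) hd2⟩
        · simp only [findOrderGo, hbeq, Bool.false_eq_true, if_false, hstep]
          rw [ihx.2]
          constructor
          · intro h d hd1 hd2
            by_cases hda : d = a
            · subst hda; exact hone
            · exact h d (by omega) hd2
          · intro h d hd1 hd2; exact h d (by omega) hd2
    · have hnil : PySem.List.pyRange a n 1 = [] := PySem.List.pyRange_one_eq_nil (by omega)
      rw [hnil]
      constructor
      · intro ord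
        simp [findOrderGo]
        intro h1 h2
        omega
      · simp [findOrderGo]
        intro d hd1 hd2
        omega

-- number theory core: with ord the least exponent in [1, n) having i^ord % n = 1,
-- i^j % n = 1 ↔ ord ∣ j (for j ≥ 0)
theorem pow_mod_one_iff_dvd (i n ord : Int) (hn : 2 ≤ n) (hord1 : 1 ≤ ord)
    (hord : PySem.Int.mod (i ^ ord.toNat) n = 1)
    (hmin : ∀ d, 1 ≤ d → d < ord → PySem.Int.mod (i ^ d.toNat) n ≠ 1) :
    ∀ j, 0 ≤ j → (PySem.Int.mod (i ^ j.toNat) n = 1 ↔ PySem.Int.mod j ord = 0) := by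
  intro j hj
  rw [mod_eq_one_iff_zmod n _ hn] at hord
  push_cast at hord
  have hx : orderOf ((i : ZMod n.toNat)) = ord.toNat := by
    rw [orderOf_eq_iff (by omega)]
    refine ⟨hord, fun m hm hm0 hcon => ?_⟩
    apply hmin (m : Int) (by omega) (by omega)
    rw [mod_eq_one_iff_zmod n _ hn]
    push_cast
    rw [show ((m:Int)).toNat = m by omega]
    exact hcon
  rw [mod_eq_one_iff_zmod n _ hn]
  push_cast
  rw [← orderOf_dvd_iff_pow_eq_one, hx, PySem.Int.mod_eq_zero_iff_dvd]
  constructor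
  · intro h
    have := Int.natCast_dvd_natCast.2 h
    rwa [Int.toNat_of_nonneg (by omega), Int.toNat_of_nonneg hj] at this
  · intro h
    have : ord.toNat ∣ j.toNat := by
      rw [← Int.natCast_dvd_natCast, Int.toNat_of_nonneg (by omega), Int.toNat_of_nonneg hj]
      exact h
    exact this

-- invariant: every stored count is ≥ 1
def dictGE1 (d : PySem.Dict Int Int) : Prop := ∀ p ∈ d.items, 1 ≤ p.2

theorem find?_congr_mem {p q : Int → Bool} : ∀ (l : List Int), (∀ a ∈ l, p a = q a) →
    l.find? p = l.find? q := by
  intro l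
  induction l with
  | nil => intro _; rfl
  | cons x xs ih =>
    intro h
    simp only [List.find?_cons, h x (by simp)]
    split
    · rfl
    · exact ih (fun a ha => h a (by simp [ha]))

theorem foldl_eq_of_inv {α β : Type} (P : β → Prop) (fA fB : β → α → β) :
    ∀ (l : List α) (init : β), P init →
      (∀ d i, i ∈ l → P d → fA d i = fB d i ∧ P (fB d i)) →
      l.foldl fA init = l.foldl fB init := by
  intro l
  induction l with
  | nil => intro _ _ _; rfl
  | cons x xs ih =>
    intro init hP h
    have hx := h init x (by simp) hP
    simp only [List.foldl_cons, hx.1]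
    exact ih _ hx.2 (fun d i hi hd => h d i (by simp [hi]) hd)

theorem dictGE1_insert {d : PySem.Dict Int Int} {k v : Int} (hd : dictGE1 d) (hv : 1 ≤ v) :
    dictGE1 (d.insert k v) := by
  intro p hp
  rcases (PySem.Dict.mem_items_insert _ _ _ _).1 hp with rfl | ⟨hp, _⟩
  · exact hv
  · exact hd p hp

theorem step_eq (n : Int) (hn : 2 ≤ n) (cnt : PySem.Dict Int Int) (i : Int)
    (hP : dictGE1 cnt) :
    stepA n cnt i = stepB n cnt i ∧ dictGE1 (stepB n cnt i) := by
  have hspec := findOrderGo_spec i n hn 1 (le_refl 1)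
  have hinit : PySem.Int.mod i n = PySem.Int.mod (i ^ ((1:Int)).toNat) n := by
    norm_num
  cases hgo : findOrderGo i n (PySem.List.pyRange 1 n 1) (PySem.Int.mod i n) with
  | none =>
    rw [hinit] at hgo
    have hnone := hspec.2.1 hgo
    have hfindA : List.find? (fun j => PySem.Int.mod (i ^ j.toNat) n == 1) (posList n) = none := by
      apply List.find?_eq_none.2
      intro j hj
      have hb := posList_bounds n hn j hj
      simp [hnone j (by omega) (by omega)]
    rw [← hinit] at hgo
    constructor
    · simp only [stepA, stepB, hgo, hfindA]
    · simp only [stepB, hgo]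
      exact hP
  | some ord =>
    rw [hinit] at hgo
    obtain ⟨hle, hlt, hordeq, hmin⟩ := (hspec.1 ord).1 hgo
    have hiff := pow_mod_one_iff_dvd i n ord hn hle hordeq hmin
    have hfeq : List.find? (fun j => PySem.Int.mod (i ^ j.toNat) n == 1) (posList n)
        = List.find? (fun j => PySem.Int.mod j ord == 0) (posList n) := by
      apply find?_congr_mem
      intro j hj
      have hb := posList_bounds n hn j hj
      have := hiff j (by omega)
      rw [Bool.eq_iff_iff]
      simp only [beq_iff_eq]
      exact this
    rw [← hinit] at hgo
    cases hfind : List.find? (fun j => PySem.Int.mod j ord == 0) (posList n) with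
    | none =>
      constructor
      · simp only [stepA, stepB, hgo, hfeq, hfind]
      · simp only [stepB, hgo, hfind]
        exact hP
    | some j =>
      cases hget : cnt.get? j with
      | some v =>
        have hv : 1 ≤ v := hP (j, v) (PySem.Dict.mem_items_of_get?_eq_some cnt hget)
        constructor
        · simp only [stepA, stepB, hgo, hfeq, hfind, hget, if_pos (by omega : v ≥ 1),
            PySem.Dict.getD_of_get?_eq_some cnt 0 hget]
        · simp only [stepB, hgo, hfind, PySem.Dict.getD_of_get?_eq_some cnt 0 hget]
          exact dictGE1_insert hP (by omega)
      | none =>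
        constructor
        · simp only [stepA, stepB, hgo, hfeq, hfind, hget,
            PySem.Dict.getD_of_get?_eq_none cnt 0 hget]
          norm_num
        · simp only [stepB, hgo, hfind, PySem.Dict.getD_of_get?_eq_none cnt 0 hget]
          exact dictGE1_insert hP (by omega)

theorem main_eq (group_num : Int) : element_amount group_num = element_amount_alt group_num := by
  by_cases hn : 2 ≤ group_num
  · unfold element_amount element_amount_alt
    congr 1
    apply foldl_eq_of_inv dictGE1
    · intro p hp
      simp [PySem.Dict.empty] at hp
    · intro d i _hi hd
      exact step_eq group_num hn d i hd
  · unfold element_amount element_amount_alt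
    rw [PySem.List.pyRange_one_eq_nil (by omega)]
    rfl

-- ===== VERDICT (by name: the statement is the Claim_ definition above) =====
theorem element_amount_spec : Claim_equal_element_amount := by
  intro g _
  unfold Spec_element_amount
  exact main_eq g
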